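-- pv_equiv track=rewrite | github.com/rchopinw/coding_exercise | permutations.py | generate_anagrams_ii
-- ===== SOURCE A (Python) =====
-- from collections import Counter
--
-- def generate_anagrams_ii(s):  # generate anagrams with duplication
--     result = []
--
--     def backtrack(cur_s, rec):
--         if len(cur_s) == len(s):
--             result.append(cur_s)
--             return
--         for c in rec:
--             if rec[c] > 0:
--                 rec[c] -= 1
--                 backtrack(cur_s + c, rec)
--                 rec[c] += 1
--     backtrack('', Counter(s))
--     return result
-- ===== SOURCE B (Python) =====
-- from collections import Counter
--
-- def generate_anagrams_ii(s):  # generate anagrams with duplication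
--     memo = {}  # counts-vector of the remaining multiset -> its list of anagrams
--
--     def gen(counter):
--         key = tuple(counter.values())
--         r = memo.get(key)
--         if r is not None:
--             return r
--         if not any(counter.values()):
--             res = ['']
--         else:
--             res = []
--             for c in counter:
--                 if counter[c] > 0:
--                     counter[c] -= 1
--                     res += [c + t for t in gen(counter)]
--                     counter[c] += 1
--         memo[key] = res
--         return res
--
--     return gen(Counter(s))
-- ===== Notes on version B (the rewrite author's own statement) =====
-- stated objective: alternative
-- what changed: Replaced the shared-result backtracker that threads a growing prefix cur_s and appends completed strings to a closure variable by a value-returning recursion on the counter alone, memoized on the remaining counts vector: the base case is an exhausted counter (not a length test against s), each recursive call returns the anagram list of the remaining multiset (computed once per distinct multiset state and reused via the memo dict), and the current letter is prepended to each returned string.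
import Mathlib
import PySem

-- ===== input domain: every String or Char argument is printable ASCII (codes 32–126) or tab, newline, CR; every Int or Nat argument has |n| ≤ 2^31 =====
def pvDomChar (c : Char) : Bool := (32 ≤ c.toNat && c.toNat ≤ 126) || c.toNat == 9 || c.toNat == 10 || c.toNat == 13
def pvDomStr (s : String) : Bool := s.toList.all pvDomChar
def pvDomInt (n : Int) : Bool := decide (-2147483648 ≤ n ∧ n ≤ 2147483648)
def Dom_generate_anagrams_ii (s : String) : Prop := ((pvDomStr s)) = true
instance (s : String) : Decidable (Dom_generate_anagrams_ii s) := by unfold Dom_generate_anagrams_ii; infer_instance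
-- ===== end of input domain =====

-- B replaces A's shared-accumulator backtracking over a growing prefix by a value-returning
-- recursion on the counter alone (exhausted-counter base case, letter prepended to each returned
-- anagram of the decremented counter), memoized on the remaining counts vector so each distinct
-- multiset state is solved once; same return values.

-- ===== PORT A =====
-- A's recursive backtrack(cur_s, rec): strings are carried as List Char; the recursion's fuel
-- is a totality device only (fuel = len(s)+1 always suffices, exactly mirroring Python's depth).
-- 'rec[c] -= 1; backtrack(...); rec[c] += 1' is pure here: the recursive call receives the
-- decremented dict and the original 'rec' is unchanged for the following loop iterations.
def pvBacktrackA (fuel : Nat) (slen : Nat) (cur : List Char) (rec : PySem.Dict Char Int)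
    (result : List (List Char)) : List (List Char) :=
  match fuel with
  | 0 => result
  | fuel + 1 =>
    if cur.length == slen then result ++ [cur]
    else
      rec.keys.foldl (fun res c =>
        if rec.getD c 0 > 0 then
          pvBacktrackA fuel slen (cur ++ [c]) (rec.modify c 0 (· - 1)) res
        else res) result

def generate_anagrams_ii (s : String) : List String :=
  (pvBacktrackA (s.toList.length + 1) s.toList.length [] (PySem.Dict.counter s.toList) []).map
    String.ofList

-- ===== PORT B =====
-- B's gen(counter) with the memo dict threaded through: the pair is (returned list, memo after
-- the call); key = tuple(counter.values()); 'c + t' on the List Char carrier is 'c :: t';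
-- 'not any(counter.values())' is 'no value is nonzero'. Fuel is the same totality device as in A.
def pvGenMemoB (fuel : Nat) (rec : PySem.Dict Char Int)
    (memo : PySem.Dict (List Int) (List (List Char))) :
    List (List Char) × PySem.Dict (List Int) (List (List Char)) :=
  match fuel with
  | 0 => ([], memo)
  | fuel + 1 =>
    match memo.get? rec.values with
    | some r => (r, memo)
    | none =>
      let p : List (List Char) × PySem.Dict (List Int) (List (List Char)) :=
        if !(rec.values.any fun v => v != 0) then ([[]], memo)
        else
          rec.keys.foldl (fun p c =>
            if rec.getD c 0 > 0 then
              let q := pvGenMemoB fuel (rec.modify c 0 (· - 1)) p.2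
              (p.1 ++ q.1.map (fun t => c :: t), q.2)
            else p) ([], memo)
      (p.1, p.2.insert rec.values p.1)

def generate_anagrams_ii_alt (s : String) : List String :=
  ((pvGenMemoB (s.toList.length + 1) (PySem.Dict.counter s.toList) PySem.Dict.empty).1).map
    String.ofList

-- ===== PRECONDITION & SPEC =====
def Spec_generate_anagrams_ii (s : String) (out : List String) : Prop := out = generate_anagrams_ii_alt s
instance (s : String) (out : List String) : Decidable (Spec_generate_anagrams_ii s out) := by unfold Spec_generate_anagrams_ii; infer_instance

-- ===== CLAIM (what is proved, stated in full; the proofs are below) =====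
def Claim_equal_generate_anagrams_ii : Prop := ∀ (s : String), Dom_generate_anagrams_ii s → Spec_generate_anagrams_ii s (generate_anagrams_ii s)

-- ===== LEMMAS AND PROOFS =====

-- the un-memoized skeleton of B's recursion: the reference both ports are compared with
def pvGen (fuel : Nat) (rec : PySem.Dict Char Int) : List (List Char) :=
  match fuel with
  | 0 => []
  | fuel + 1 =>
    if !(rec.values.any fun v => v != 0) then [[]]
    else
      rec.keys.foldl (fun r c =>
        if rec.getD c 0 > 0 then
          r ++ (pvGen fuel (rec.modify c 0 (· - 1))).map (fun t => c :: t)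
        else r) []

-- sum of the counts stored in the dict, read through the (Nodup) key list
def pvDictSum (rec : PySem.Dict Char Int) : Int :=
  (rec.keys.map (fun k => rec.getD k 0)).sum

lemma pvDictSum_eq_values_sum (rec : PySem.Dict Char Int) (hnd : rec.keys.Nodup) :
    pvDictSum rec = rec.values.sum := by
  unfold pvDictSum
  rw [PySem.Dict.values_eq_map_keys rec hnd 0]

lemma pvIndicatorSum (K : List Char) (x : Char) (v : Int) (hnd : K.Nodup) :
    (K.map (fun k => if k = x then v else 0)).sum = if x ∈ K then v else 0 := by
  induction K with
  | nil => simp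
  | cons y ys ih =>
    have hy : y ∉ ys := (List.nodup_cons.1 hnd).1
    by_cases hxy : y = x
    · subst hxy
      simp [hy, ih (List.nodup_cons.1 hnd).2]
    · have hne : x ≠ y := fun h => hxy h.symm
      have hmem : (x ∈ y :: ys) = (x ∈ ys) := by
        simp [List.mem_cons, hne]
      simp only [List.map_cons, List.sum_cons, if_neg hxy, zero_add, ih (List.nodup_cons.1 hnd).2,
        hmem]

lemma pvKeysModifyEq (rec : PySem.Dict Char Int) (c : Char) (hc : c ∈ rec.keys) :
    (rec.modify c 0 (· - 1)).keys = rec.keys := by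
  rw [PySem.Dict.keys_modify, PySem.Dict.keys_insert_of_contains]
  exact (PySem.Dict.contains_iff_mem_keys rec c).2 hc

lemma pvDictSum_counter (xs : List Char) : pvDictSum (PySem.Dict.counter xs) = xs.length := by
  unfold pvDictSum
  rw [PySem.Dict.keys_counter]
  have h : ∀ k, (PySem.Dict.counter xs).getD k 0 = (xs.count k : Int) := fun k =>
    PySem.Dict.getD_counter xs k
  rw [List.map_congr_left (fun k _ => h k)]
  clear h
  induction xs using List.reverseRecOn with
  | nil => simp
  | append_singleton xs x ih =>
    have hf : ∀ k ∈ PySem.Set.ofList xs,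
        ((xs ++ [x]).count k : Int) = (xs.count k : Int) + (if k = x then 1 else 0) := by
      intro k _
      by_cases h : k = x
      · simp [List.count_append, h]
      · have h0 : List.count k [x] = 0 := List.count_eq_zero.2 (by simp [h])
        simp [List.count_append, h, h0]
    rw [PySem.Set.ofList_append_singleton]
    by_cases hx : x ∈ PySem.Set.ofList xs
    · rw [PySem.Set.add_of_mem hx, List.map_congr_left hf, PySem.List.sum_map_add_int, ih,
        pvIndicatorSum _ _ _ (PySem.Set.nodup_ofList (xs := xs)), if_pos hx]
      simp
    · have hcx : xs.count x = 0 := by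
        rw [List.count_eq_zero]
        exact fun hmem => hx ((PySem.Set.mem_ofList xs x).2 hmem)
      rw [PySem.Set.add_of_not_mem hx, List.map_append, List.sum_append,
        List.map_congr_left hf, PySem.List.sum_map_add_int, ih,
        pvIndicatorSum _ _ _ (PySem.Set.nodup_ofList (xs := xs)), if_neg hx]
      simp [List.count_append, hcx]

lemma pvDictSum_modify_sub_one (rec : PySem.Dict Char Int) (c : Char)
    (hnd : rec.keys.Nodup) (hc : c ∈ rec.keys) :
    pvDictSum (rec.modify c 0 (· - 1)) = pvDictSum rec - 1 := by
  unfold pvDictSum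
  rw [pvKeysModifyEq rec c hc]
  have hget : ∀ k ∈ rec.keys, (rec.modify c 0 (· - 1)).getD k 0
      = rec.getD k 0 + (if k = c then -1 else 0) := by
    intro k _
    rw [PySem.Dict.getD_modify]
    split_ifs with h
    · subst h; omega
    · omega
  rw [List.map_congr_left hget, PySem.List.sum_map_add_int, pvIndicatorSum _ _ _ hnd, if_pos hc]
  ring

lemma pvDictSum_nonneg (rec : PySem.Dict Char Int)
    (hnn : ∀ k ∈ rec.keys, 0 ≤ rec.getD k 0) : 0 ≤ pvDictSum rec := by
  unfold pvDictSum
  apply List.sum_nonneg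
  intro v hv
  obtain ⟨k, hk, rfl⟩ := List.mem_map.1 hv
  exact hnn k hk

lemma pvAnyFalse (rec : PySem.Dict Char Int) (hnd : rec.keys.Nodup)
    (hnn : ∀ k ∈ rec.keys, 0 ≤ rec.getD k 0) (hz : pvDictSum rec = 0) :
    (rec.values.any fun v => v != 0) = false := by
  rw [PySem.Dict.values_eq_map_keys rec hnd 0, List.any_eq_false]
  intro v hv
  obtain ⟨k, hk, rfl⟩ := List.mem_map.1 hv
  have hle : rec.getD k 0 ≤ pvDictSum rec :=
    List.single_le_sum (fun v hv => by
      obtain ⟨k', hk', rfl⟩ := List.mem_map.1 hv; exact hnn k' hk') _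
      (List.mem_map.2 ⟨k, hk, rfl⟩)
  have := hnn k hk
  simp only [bne_iff_ne, ne_eq, not_not]
  omega

lemma pvAnyTrue (rec : PySem.Dict Char Int) (hnd : rec.keys.Nodup)
    (hpos : 0 < pvDictSum rec) : (rec.values.any fun v => v != 0) = true := by
  by_contra h
  have hall := eq_false_of_ne_true h
  rw [PySem.Dict.values_eq_map_keys rec hnd 0, List.any_eq_false] at hall
  have : pvDictSum rec = 0 := by
    unfold pvDictSum
    apply List.sum_eq_zero
    intro v hv
    have := hall v hv
    simpa using this
  omega

-- pointwise counts from equal key and value lists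
lemma pvGetD_eq (d d' : PySem.Dict Char Int) (hk : d.keys = d'.keys) (hnd : d.keys.Nodup)
    (hv : d.values = d'.values) : ∀ k ∈ d.keys, d.getD k 0 = d'.getD k 0 := by
  have h1 := PySem.Dict.values_eq_map_keys d hnd 0
  have h2 := PySem.Dict.values_eq_map_keys d' (hk ▸ hnd) 0
  rw [h1, h2, ← hk] at hv
  exact List.map_inj_left.1 hv

lemma pvValuesModify_eq (d d' : PySem.Dict Char Int) (hk : d.keys = d'.keys)
    (hnd : d.keys.Nodup) (hv : d.values = d'.values) (c : Char) (hc : c ∈ d.keys) :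
    (d.modify c 0 (· - 1)).values = (d'.modify c 0 (· - 1)).values := by
  have hc' : c ∈ d'.keys := hk ▸ hc
  rw [PySem.Dict.values_eq_map_keys _ ((pvKeysModifyEq d c hc).symm ▸ hnd) 0,
    PySem.Dict.values_eq_map_keys _ ((pvKeysModifyEq d' c hc').symm ▸ (hk ▸ hnd)) 0,
    pvKeysModifyEq d c hc, pvKeysModifyEq d' c hc', ← hk]
  apply List.map_congr_left
  intro k hkm
  rw [PySem.Dict.getD_modify, PySem.Dict.getD_modify]
  split_ifs with h
  · rw [pvGetD_eq d d' hk hnd hv c hc]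
  · exact pvGetD_eq d d' hk hnd hv k hkm

-- pvGen only depends on the key list and the counts along it
lemma pvGen_repr (fuel : Nat) : ∀ (d d' : PySem.Dict Char Int), d.keys = d'.keys →
    d.keys.Nodup → d.values = d'.values → pvGen fuel d = pvGen fuel d' := by
  induction fuel with
  | zero => intro d d' _ _ _; rfl
  | succ fuel ih =>
    intro d d' hk hnd hv
    simp only [pvGen, hv, ← hk]
    split_ifs with hbb
    · rfl
    · apply PySem.List.foldl_congr_mem
      intro acc c hc
      by_cases hpc : d.getD c 0 > 0
      · rw [if_pos hpc, if_pos (by rw [← pvGetD_eq d d' hk hnd hv c hc]; exact hpc),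
          ih (d.modify c 0 (· - 1)) (d'.modify c 0 (· - 1))
            (by rw [pvKeysModifyEq d c hc, pvKeysModifyEq d' c (hk ▸ hc), hk])
            (by rw [pvKeysModifyEq d c hc]; exact hnd)
            (pvValuesModify_eq d d' hk hnd hv c hc)]
      · rw [if_neg hpc, if_neg (by rw [← pvGetD_eq d d' hk hnd hv c hc]; exact hpc)]

-- pvGen is fuel-independent once the fuel exceeds the number of letters left
lemma pvGen_fuel_indep (fuel : Nat) : ∀ (fuel' : Nat) (rec : PySem.Dict Char Int),
    rec.keys.Nodup → (∀ k ∈ rec.keys, 0 ≤ rec.getD k 0) →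
    pvDictSum rec < fuel → pvDictSum rec < fuel' →
    pvGen fuel rec = pvGen fuel' rec := by
  induction fuel with
  | zero =>
    intro fuel' rec _ hnn hf _
    have := pvDictSum_nonneg rec hnn
    omega
  | succ fuel ih =>
    intro fuel' rec hnd hnn hf hf'
    have hs0 := pvDictSum_nonneg rec hnn
    match fuel' with
    | 0 => omega
    | fuel' + 1 =>
      simp only [pvGen]
      by_cases hz : pvDictSum rec = 0
      · rw [pvAnyFalse rec hnd hnn hz]
        simp
      · rw [pvAnyTrue rec hnd (by omega)]
        simp only [Bool.not_true, Bool.false_eq_true, if_false]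
        apply PySem.List.foldl_congr_mem
        intro acc c hc
        by_cases hpc : rec.getD c 0 > 0
        · rw [if_pos hpc, if_pos hpc,
            ih fuel' (rec.modify c 0 (· - 1))
              (by rw [pvKeysModifyEq rec c hc]; exact hnd)
              (by
                intro k hk
                rw [pvKeysModifyEq rec c hc] at hk
                rw [PySem.Dict.getD_modify]
                split_ifs with h
                · omega
                · exact hnn k hk)
              (by rw [pvDictSum_modify_sub_one rec c hnd hc]; omega)
              (by rw [pvDictSum_modify_sub_one rec c hnd hc]; omega)]
        · rw [if_neg hpc, if_neg hpc]

-- an initial accumulator shifts out of the pure fold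
lemma pvFoldShift (n : Nat) (rec : PySem.Dict Char Int) (M : List Char)
    (init : List (List Char)) :
    M.foldl (fun r c =>
      if rec.getD c 0 > 0 then
        r ++ (pvGen n (rec.modify c 0 (· - 1))).map (fun t => c :: t)
      else r) init
    = init ++ M.foldl (fun r c =>
      if rec.getD c 0 > 0 then
        r ++ (pvGen n (rec.modify c 0 (· - 1))).map (fun t => c :: t)
      else r) [] := by
  rw [PySem.List.foldl_congr_mem M _ (fun r c =>
        r ++ (if rec.getD c 0 > 0 then
          (pvGen n (rec.modify c 0 (· - 1))).map (fun t => c :: t) else [])) init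
      (by intro acc x _; by_cases h : rec.getD x 0 > 0 <;> simp [h]),
      PySem.List.foldl_append_eq_flatMap,
      PySem.List.foldl_congr_mem M _ (fun r c =>
        r ++ (if rec.getD c 0 > 0 then
          (pvGen n (rec.modify c 0 (· - 1))).map (fun t => c :: t) else []))
        ([] : List (List Char))
      (by intro acc x _; by_cases h : rec.getD x 0 > 0 <;> simp [h]),
      PySem.List.foldl_append_eq_flatMap]
  simp

-- A's backtracker from (cur, rec, res) yields res ++ map (cur ++ ·) (pvGen rec)
lemma pvMain (fuel : Nat) :
    ∀ (slen : Nat) (cur : List Char) (rec : PySem.Dict Char Int) (res : List (List Char)),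
    rec.keys.Nodup →
    (∀ k ∈ rec.keys, 0 ≤ rec.getD k 0) →
    (cur.length : Int) + pvDictSum rec = slen →
    slen - cur.length < fuel →
    pvBacktrackA fuel slen cur rec res = res ++ (pvGen fuel rec).map (fun t => cur ++ t) := by
  induction fuel with
  | zero => intro slen cur rec res _ _ _ hf; omega
  | succ fuel ih =>
    intro slen cur rec res hnd hnn hsum hf
    have hsum_nn : 0 ≤ pvDictSum rec := pvDictSum_nonneg rec hnn
    by_cases hdone : cur.length = slen
    · -- base case: lengths match ⇔ counts exhausted
      have hzero : pvDictSum rec = 0 := by omega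
      simp only [pvBacktrackA, pvGen, hdone, beq_self_eq_true, if_true,
        pvAnyFalse rec hnd hnn hzero]
      simp
    · -- recursive case
      have hpos : 0 < pvDictSum rec := by
        rcases lt_or_eq_of_le hsum_nn with h | h
        · exact h
        · exfalso; apply hdone; omega
      have hne : (cur.length == slen) = false := by simp [hdone]
      simp only [pvBacktrackA, pvGen, hne, pvAnyTrue rec hnd hpos, if_false,
        Bool.false_eq_true, Bool.not_true]
      -- the fold over the key list, generalized to any sublist of the keys
      have hfold : ∀ L : List Char, (∀ c ∈ L, c ∈ rec.keys) → ∀ res0,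
          L.foldl (fun r c =>
            if rec.getD c 0 > 0 then
              pvBacktrackA fuel slen (cur ++ [c]) (rec.modify c 0 (· - 1)) r
            else r) res0
          = res0 ++ (L.foldl (fun r c =>
              if rec.getD c 0 > 0 then
                r ++ (pvGen fuel (rec.modify c 0 (· - 1))).map (fun t => c :: t)
              else r) []).map (fun t => cur ++ t) := by
        intro L
        induction L with
        | nil => intro _ res0; simp
        | cons c L ihL =>
          intro hmem res0
          have hcK : c ∈ rec.keys := hmem c (List.mem_cons_self ..)
          simp only [List.foldl_cons]
          by_cases hpc : rec.getD c 0 > 0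
          · have hkeys := pvKeysModifyEq rec c hcK
            have hrec := ih slen (cur ++ [c]) (rec.modify c 0 (· - 1)) res0
              (by rw [hkeys]; exact hnd)
              (by
                intro k hk
                rw [hkeys] at hk
                rw [PySem.Dict.getD_modify]
                split_ifs with h
                · omega
                · exact hnn k hk)
              (by
                rw [pvDictSum_modify_sub_one rec c hnd hcK]
                simp only [List.length_append, List.length_singleton]
                push_cast
                omega)
              (by simp only [List.length_append, List.length_singleton]; omega)
            rw [if_pos hpc, if_pos hpc, hrec,
              ihL (fun x hx => hmem x (List.mem_cons_of_mem _ hx))]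
            simp only [List.nil_append]
            rw [pvFoldShift fuel rec L ((pvGen fuel (rec.modify c 0 (· - 1))).map (fun t => c :: t))]
            simp [List.map_append, List.map_map, Function.comp_def, List.append_assoc]
          · rw [if_neg hpc, if_neg hpc,
              ihL (fun x hx => hmem x (List.mem_cons_of_mem _ hx))]
      exact hfold rec.keys (fun _ h => h) res

-- the memo invariant: every stored entry is the pvGen value of a dict with key list K
def pvInv (K : List Char) (memo : PySem.Dict (List Int) (List (List Char))) : Prop :=
  ∀ v r, memo.get? v = some r → ∃ d : PySem.Dict Char Int, d.keys = K ∧ d.values = v ∧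
    ∀ f : Nat, pvDictSum d < f → pvGen f d = r

-- B's memoized recursion computes pvGen and preserves the invariant
lemma pvMemoMain (fuel : Nat) :
    ∀ (rec : PySem.Dict Char Int) (memo : PySem.Dict (List Int) (List (List Char))),
    rec.keys.Nodup →
    (∀ k ∈ rec.keys, 0 ≤ rec.getD k 0) →
    pvDictSum rec < fuel →
    pvInv rec.keys memo →
    (pvGenMemoB fuel rec memo).1 = pvGen fuel rec ∧
      pvInv rec.keys (pvGenMemoB fuel rec memo).2 := by
  induction fuel with
  | zero =>
    intro rec memo _ hnn hf _
    have := pvDictSum_nonneg rec hnn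
    omega
  | succ fuel ih =>
    intro rec memo hnd hnn hf hInv
    have hs0 := pvDictSum_nonneg rec hnn
    cases hget : memo.get? rec.values with
    | some r =>
      obtain ⟨d, hdk, hdv, hdf⟩ := hInv _ _ hget
      have hdnd : d.keys.Nodup := hdk ▸ hnd
      have hds : pvDictSum d = pvDictSum rec := by
        rw [pvDictSum_eq_values_sum d hdnd, pvDictSum_eq_values_sum rec hnd, hdv]
      have h1 : pvGen (fuel + 1) rec = r := by
        rw [pvGen_repr (fuel + 1) rec d (by rw [hdk]) hnd (by rw [hdv])]
        exact hdf (fuel + 1) (by omega)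
      simp only [pvGenMemoB, hget]
      exact ⟨h1.symm, hInv⟩
    | none =>
      by_cases hz : pvDictSum rec = 0
      · have hb := pvAnyFalse rec hnd hnn hz
        have h1 : pvGen (fuel + 1) rec = [[]] := by
          simp [pvGen, hb]
        have hrecAll : ∀ f : Nat, pvDictSum rec < f → pvGen f rec = [[]] := by
          intro f hfp
          cases f with
          | zero => omega
          | succ f => simp [pvGen, hb]
        simp only [pvGenMemoB, hget, hb, Bool.not_false, if_true]
        refine ⟨h1.symm, ?_⟩
        intro v r hvr
        rw [PySem.Dict.get?_insert] at hvr
        split_ifs at hvr with hv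
        · exact ⟨rec, rfl, hv.symm, by simpa [← Option.some_inj.1 hvr] using hrecAll⟩
        · exact hInv v r hvr
      · have hb := pvAnyTrue rec hnd (by omega)
        -- the memoized fold computes the pure fold and preserves the invariant
        have hfold : ∀ L : List Char, (∀ c ∈ L, c ∈ rec.keys) →
            ∀ (res0 : List (List Char)) (memo0 : PySem.Dict (List Int) (List (List Char))),
            pvInv rec.keys memo0 →
            (L.foldl (fun p c =>
              if rec.getD c 0 > 0 then
                ((p.1 ++ ((pvGenMemoB fuel (rec.modify c 0 (· - 1)) p.2).1).map (fun t => c :: t)),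
                  (pvGenMemoB fuel (rec.modify c 0 (· - 1)) p.2).2)
              else p) (res0, memo0)).1
              = res0 ++ L.foldl (fun r c =>
                  if rec.getD c 0 > 0 then
                    r ++ (pvGen fuel (rec.modify c 0 (· - 1))).map (fun t => c :: t)
                  else r) [] ∧
            pvInv rec.keys (L.foldl (fun p c =>
              if rec.getD c 0 > 0 then
                ((p.1 ++ ((pvGenMemoB fuel (rec.modify c 0 (· - 1)) p.2).1).map (fun t => c :: t)),
                  (pvGenMemoB fuel (rec.modify c 0 (· - 1)) p.2).2)
              else p) (res0, memo0)).2 := by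
          intro L
          induction L with
          | nil => intro _ res0 memo0 hI; simp [hI]
          | cons c L ihL =>
            intro hmem res0 memo0 hI
            have hcK : c ∈ rec.keys := hmem c (List.mem_cons_self ..)
            simp only [List.foldl_cons]
            by_cases hpc : rec.getD c 0 > 0
            · have hkeys := pvKeysModifyEq rec c hcK
              have hchild := ih (rec.modify c 0 (· - 1)) memo0
                (by rw [hkeys]; exact hnd)
                (by
                  intro k hk
                  rw [hkeys] at hk
                  rw [PySem.Dict.getD_modify]
                  split_ifs with h
                  · omega
                  · exact hnn k hk)
                (by rw [pvDictSum_modify_sub_one rec c hnd hcK]; omega)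
                (by rw [hkeys]; exact hI)
              rw [hkeys] at hchild
              obtain ⟨hcval, hcInv⟩ := hchild
              rw [if_pos hpc, if_pos hpc]
              obtain ⟨hres, hinv⟩ := ihL (fun x hx => hmem x (List.mem_cons_of_mem _ hx))
                (res0 ++ ((pvGenMemoB fuel (rec.modify c 0 (· - 1)) memo0).1).map (fun t => c :: t))
                ((pvGenMemoB fuel (rec.modify c 0 (· - 1)) memo0).2) hcInv
              refine ⟨?_, hinv⟩
              rw [hres, hcval, List.nil_append,
                pvFoldShift fuel rec L ((pvGen fuel (rec.modify c 0 (· - 1))).map (fun t => c :: t))]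
              simp [List.append_assoc]
            · rw [if_neg hpc, if_neg hpc]
              exact ihL (fun x hx => hmem x (List.mem_cons_of_mem _ hx)) res0 memo0 hI
        obtain ⟨hres, hinv⟩ := hfold rec.keys (fun _ h => h) [] memo hInv
        have h1 : pvGen (fuel + 1) rec
            = rec.keys.foldl (fun r c =>
                if rec.getD c 0 > 0 then
                  r ++ (pvGen fuel (rec.modify c 0 (· - 1))).map (fun t => c :: t)
                else r) [] := by
          simp [pvGen, hb]
        simp only [pvGenMemoB, hget, hb, Bool.not_true, Bool.false_eq_true, if_false]
        rw [List.nil_append] at hres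
        refine ⟨by rw [hres, h1], ?_⟩
        intro v r hvr
        rw [PySem.Dict.get?_insert] at hvr
        split_ifs at hvr with hv
        · refine ⟨rec, rfl, hv.symm, ?_⟩
          intro f hfp
          rw [← Option.some_inj.1 hvr, hres, ← h1]
          exact pvGen_fuel_indep f (fuel + 1) rec hnd hnn hfp hf
        · exact hinv v r hvr

-- ===== VERDICT (by name: the statement is the Claim_ definition above) =====
theorem generate_anagrams_ii_spec : Claim_equal_generate_anagrams_ii := by
  intro s _
  unfold Spec_generate_anagrams_ii generate_anagrams_ii generate_anagrams_ii_alt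
  have hnd := PySem.Dict.nodup_keys_counter s.toList
  have hnn : ∀ k ∈ (PySem.Dict.counter s.toList).keys, 0 ≤ (PySem.Dict.counter s.toList).getD k 0 := by
    intro k _
    rw [PySem.Dict.getD_counter]
    positivity
  have hsum : pvDictSum (PySem.Dict.counter s.toList) = s.toList.length := pvDictSum_counter s.toList
  have hA := pvMain (s.toList.length + 1) s.toList.length [] (PySem.Dict.counter s.toList) []
    hnd hnn (by rw [hsum]; simp) (by simp)
  have hB := pvMemoMain (s.toList.length + 1) (PySem.Dict.counter s.toList) PySem.Dict.empty
    hnd hnn (by rw [hsum]; omega)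
    (by intro v r hvr; rw [PySem.Dict.get?_empty] at hvr; exact absurd hvr (by simp))
  rw [hA, hB.1]
  simp
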